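-- pv_equiv track=rewrite | github.com/khawlanoman/p_e | find_unmatched_brackets.py | find_unmatched_brackets
-- ===== SOURCE A (Python) =====
-- def find_unmatched_brackets(string:str):
--     stack=[]
--     l_index=[]
--     p = {
--         ")":"(",
--         "}":"{",
--         "]":"["
--     }
--
--     for index, k in enumerate(string):
--         if k in p.values():
--             stack.append((k, index))
--         elif k in p:
--             if not stack or stack[-1][0] != p[k]:
--                 l_index.append(index)
--             else:
--                 stack.pop()
--     #for _, ind in  stack:
--      #   l_index.append(ind)
--     l_index.extend (ind for _,ind in stack)
--
--     return sorted(l_index)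
-- ===== SOURCE B (Python) =====
-- def find_unmatched_brackets(string: str):
--     # Divide and conquer: each segment is summarized by a triple
--     # (dead, pending, open_) where dead = indices of closers that can never
--     # match (sorted), pending = closers still waiting for an opener to the
--     # left (in order, with their char), open_ = surplus openers (stack order,
--     # bottom..top, with their char).  Adjacent summaries combine by playing
--     # the right segment's pending closers against the left segment's surplus
--     # openers; the final answer is a merge of three already-sorted sequences,
--     # so no sort and no global left-to-right stack pass is needed.
--     pairs = {")": "(", "}": "{", "]": "["}
--
--     def merge(xs, ys):  # merge two strictly increasing integer lists
--         out = []
--         a = b = 0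
--         while a < len(xs) and b < len(ys):
--             if xs[a] < ys[b]:
--                 out.append(xs[a]); a += 1
--             else:
--                 out.append(ys[b]); b += 1
--         out.extend(xs[a:])
--         out.extend(ys[b:])
--         return out
--
--     def combine(left, right):
--         dl, pl, ol = left
--         dr, pr, orr = right
--         o = list(ol)
--         new_dead = []
--         still_pending = []
--         for c, i in pr:
--             if o:
--                 if o[-1][0] == pairs[c]:
--                     o.pop()
--                 else:
--                     new_dead.append(i)
--             else:
--                 still_pending.append((c, i))
--         return (merge(dl, merge(dr, new_dead)), pl + still_pending, o + orr)
--
--     def seg(lo, hi):  # summary triple for string[lo:hi], hi > lo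
--         if hi - lo == 1:
--             c = string[lo]
--             if c in "([{":
--                 return ([], [], [(c, lo)])
--             if c in pairs:
--                 return ([], [(c, lo)], [])
--             return ([], [], [])
--         mid = (lo + hi) // 2
--         return combine(seg(lo, mid), seg(mid, hi))
--
--     if not string:
--         return []
--     dead, pending, open_ = seg(0, len(string))
--     return merge(merge(dead, [i for _, i in pending]), [i for _, i in open_])
-- ===== Notes on version B (the rewrite author's own statement) =====
-- stated objective: alternative
-- what changed: B replaces A's single left-to-right stack scan plus final sorted() by a divide-and-conquer algorithm: each half of the string is summarized by a (dead-closers, pending-closers, surplus-openers) triple, adjacent summaries are combined by playing the right half's pending closers against the left half's surplus openers, and the three already-sorted index sequences are merged without any sort.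
import Mathlib
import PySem

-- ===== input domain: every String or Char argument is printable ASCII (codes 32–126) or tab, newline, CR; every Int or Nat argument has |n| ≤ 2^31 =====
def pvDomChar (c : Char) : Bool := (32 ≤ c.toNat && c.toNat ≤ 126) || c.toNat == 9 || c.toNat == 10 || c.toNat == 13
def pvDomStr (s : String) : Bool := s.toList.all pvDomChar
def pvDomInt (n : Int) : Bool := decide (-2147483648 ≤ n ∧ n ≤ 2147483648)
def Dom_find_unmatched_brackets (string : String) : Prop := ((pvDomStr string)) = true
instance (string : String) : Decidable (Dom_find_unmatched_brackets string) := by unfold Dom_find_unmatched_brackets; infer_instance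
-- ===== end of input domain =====

-- B replaces A's single left-to-right stack pass + final sort by a divide-and-conquer
-- summary computation (dead / pending-closer / surplus-opener triples combined bottom-up)
-- whose three sorted outputs are merged, with no sort and no global scan.

-- ===== PORT A =====
def pvP : List (Char × Char) := [(')', '('), ('}', '{'), (']', '[')]

-- one iteration of A's for-loop: state = (stack, l_index)
def stepA (acc : List (Char × Int) × List Int) (ik : Int × Char) : List (Char × Int) × List Int :=
  if (pvP.map (·.2)).contains ik.2 then (acc.1 ++ [(ik.2, ik.1)], acc.2)
  else if (pvP.map (·.1)).contains ik.2 then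
    match acc.1.getLast? with
    | none => (acc.1, acc.2 ++ [ik.1])
    | some top =>
      if top.1 ≠ (pvP.lookup ik.2).getD ' ' then (acc.1, acc.2 ++ [ik.1])
      else (acc.1.dropLast, acc.2)
  else acc

def find_unmatched_brackets (string : String) : List Int :=
  let r := (PySem.List.enumerate string.toList 0).foldl stepA ([], [])
  PySem.List.sorted (r.2 ++ r.1.map (·.2)) (fun x => x) false

-- ===== PORT B =====
def pvPairs : List (Char × Char) := [(')', '('), ('}', '{'), (']', '[')]

-- Source B's merge: merge two strictly increasing integer lists (the while loop as recursion)
def mergeInt : List Int → List Int → List Int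
  | [], ys => ys
  | x :: xs, [] => x :: xs
  | x :: xs, y :: ys => if x < y then x :: mergeInt xs (y :: ys) else y :: mergeInt (x :: xs) ys
termination_by xs ys => xs.length + ys.length

-- the for-loop of Source B's combine: play pending closers against the opener stack;
-- state = (o, new_dead, still_pending)
def settle (o : List (Char × Int)) (nd : List Int) (sp : List (Char × Int)) :
    List (Char × Int) → List (Char × Int) × List Int × List (Char × Int)
  | [] => (o, nd, sp)
  | ci :: rest =>
    match o.getLast? with
    | some top =>
      if top.1 = (pvPairs.lookup ci.1).getD ' ' then settle o.dropLast nd sp rest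
      else settle o (nd ++ [ci.2]) sp rest
    | none => settle o nd (sp ++ [ci]) rest

-- Source B's combine on summary triples (dead, pending, open)
def combineT (L R : List Int × List (Char × Int) × List (Char × Int)) :
    List Int × List (Char × Int) × List (Char × Int) :=
  let s := settle L.2.2 [] [] R.2.1
  (mergeInt L.1 (mergeInt R.1 s.2.1), L.2.1 ++ s.2.2, s.1 ++ R.2.2)

-- Source B's seg: summary triple for string[lo:hi]; Python only ever calls it with lo < hi,
-- so its base test 'hi - lo == 1' is written 'hi - lo ≤ 1' (identical on all reached calls)
def segB (cs : List Char) (lo hi : Nat) : List Int × List (Char × Int) × List (Char × Int) :=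
  if hi - lo ≤ 1 then
    let c := cs.getD lo ' '
    if "([{".toList.contains c then ([], [], [(c, (lo : Int))])
    else if (pvPairs.map (·.1)).contains c then ([], [(c, (lo : Int))], [])
    else ([], [], [])
  else
    combineT (segB cs lo ((lo + hi) / 2)) (segB cs ((lo + hi) / 2) hi)
termination_by hi - lo
decreasing_by all_goals omega

def find_unmatched_brackets_alt (string : String) : List Int :=
  if string.toList = [] then []
  else
    let t := segB string.toList 0 string.toList.length
    mergeInt (mergeInt t.1 (t.2.1.map (·.2))) (t.2.2.map (·.2))

-- ===== PRECONDITION & SPEC =====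
def Spec_find_unmatched_brackets (string : String) (out : List Int) : Prop := out = find_unmatched_brackets_alt string
instance (string : String) (out : List Int) : Decidable (Spec_find_unmatched_brackets string out) := by unfold Spec_find_unmatched_brackets; infer_instance

-- ===== CLAIM (what is proved, stated in full; the proofs are below) =====
def Claim_equal_find_unmatched_brackets : Prop := ∀ (string : String), Dom_find_unmatched_brackets string → Spec_find_unmatched_brackets string (find_unmatched_brackets string)

-- ===== LEMMAS AND PROOFS =====
theorem settle_acc (P : List (Char × Int)) (o : List (Char × Int)) (nd : List Int)
    (sp : List (Char × Int)) :
    settle o nd sp P =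
      ((settle o [] [] P).1, nd ++ (settle o [] [] P).2.1, sp ++ (settle o [] [] P).2.2) := by
  induction P generalizing o nd sp with
  | nil => simp [settle]
  | cons ci rest ih =>
    cases h : o.getLast? with
    | none =>
      simp only [settle, h, List.nil_append]
      rw [ih o nd (sp ++ [ci]), ih o [] [ci]]
      simp
    | some top =>
      simp only [settle, h, List.nil_append]
      split
      · exact ih o.dropLast nd sp
      · rw [ih o (nd ++ [ci.2]) sp, ih o [ci.2] []]
        simp
theorem settle_append (P Q : List (Char × Int)) (o : List (Char × Int)) (nd : List Int)
    (sp : List (Char × Int)) :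
    settle o nd sp (P ++ Q) =
      settle (settle o nd sp P).1 (settle o nd sp P).2.1 (settle o nd sp P).2.2 Q := by
  induction P generalizing o nd sp with
  | nil => simp [settle]
  | cons ci rest ih =>
    cases h : o.getLast? with
    | none => simp only [List.cons_append, settle, h]; exact ih _ _ _
    | some top =>
      simp only [List.cons_append, settle, h]
      split <;> exact ih _ _ _
theorem settle_nil_o (P : List (Char × Int)) (nd : List Int) (sp : List (Char × Int)) :
    settle [] nd sp P = ([], nd, sp ++ P) := by
  induction P generalizing sp with
  | nil => simp [settle]
  | cons ci rest ih => simp [settle, ih]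
theorem settle_split (P : List (Char × Int)) (a b : List (Char × Int)) :
    settle (a ++ b) [] [] P =
      ((settle a [] [] (settle b [] [] P).2.2).1 ++ (settle b [] [] P).1,
       (settle b [] [] P).2.1 ++ (settle a [] [] (settle b [] [] P).2.2).2.1,
       (settle a [] [] (settle b [] [] P).2.2).2.2) := by
  induction P generalizing b with
  | nil => simp [settle]
  | cons ci rest ih =>
    rcases eq_or_ne b [] with rfl | hb
    · simp [settle_nil_o, settle]
    · have hlast : (a ++ b).getLast? = b.getLast? := List.getLast?_append_of_ne_nil (l₁ := a) hb
      obtain ⟨top, htop⟩ := Option.isSome_iff_exists.mp (List.getLast?_isSome.mpr hb)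
      simp only [settle, hlast, htop]
      split
      · rw [List.dropLast_append_of_ne_nil hb, ih b.dropLast]
      · simp only [List.nil_append]
        rw [settle_acc rest (a ++ b) [ci.2] [], settle_acc rest b [ci.2] [], ih b]
        simp
theorem mergeInt_perm (xs ys : List Int) : (mergeInt xs ys).Perm (xs ++ ys) := by
  fun_induction mergeInt xs ys with
  | case1 ys => simp
  | case2 x xs => simp
  | case3 x xs y ys h ih => simpa using List.Perm.cons x ih
  | case4 x xs y ys h ih => exact ((List.Perm.cons y ih)).trans List.perm_middle.symm

theorem mergeInt_coe (x y : List Int) :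
    ((mergeInt x y : List Int) : Multiset Int) = ↑x + ↑y := by
  rw [Multiset.coe_eq_coe.mpr (mergeInt_perm x y), ← Multiset.coe_add]

theorem mergeInt_mem (xs ys : List Int) (z : Int) (hz : z ∈ mergeInt xs ys) : z ∈ xs ∨ z ∈ ys :=
  List.mem_append.mp ((mergeInt_perm xs ys).subset hz)

theorem mergeInt_pairwise (xs ys : List Int) (hx : xs.Pairwise (· < ·)) (hy : ys.Pairwise (· < ·))
    (hd : ∀ a ∈ xs, ∀ b ∈ ys, a ≠ b) : (mergeInt xs ys).Pairwise (· < ·) := by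
  fun_induction mergeInt xs ys with
  | case1 ys => exact hy
  | case2 x xs => exact hx
  | case3 x xs y ys h ih =>
    refine List.Pairwise.cons ?_ (ih hx.of_cons hy (fun a ha => hd a (List.mem_cons_of_mem x ha)))
    intro z hz
    rcases mergeInt_mem _ _ _ hz with hz | hz
    · exact List.rel_of_pairwise_cons hx hz
    · rcases List.mem_cons.mp hz with rfl | hz
      · exact h
      · exact h.trans (List.rel_of_pairwise_cons hy hz)
  | case4 x xs y ys h ih =>
    have hyx : y < x := lt_of_le_of_ne (not_lt.mp h)
      (fun e => hd x List.mem_cons_self y List.mem_cons_self e.symm)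
    refine List.Pairwise.cons ?_
      (ih hx hy.of_cons (fun a ha b hb => hd a ha b (List.mem_cons_of_mem y hb)))
    intro z hz
    rcases mergeInt_mem _ _ _ hz with hz | hz
    · rcases List.mem_cons.mp hz with rfl | hz
      · exact hyx
      · exact hyx.trans (List.rel_of_pairwise_cons hx hz)
    · exact List.rel_of_pairwise_cons hy hz

theorem settle_o_prefix (P : List (Char × Int)) (o : List (Char × Int)) (nd : List Int)
    (sp : List (Char × Int)) : (settle o nd sp P).1 <+: o := by
  induction P generalizing o nd sp with
  | nil => simp [settle]
  | cons ci rest ih =>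
    cases h : o.getLast? with
    | none => simp only [settle, h]; exact ih _ _ _
    | some top =>
      simp only [settle, h]
      split
      · exact (ih _ _ _).trans (List.dropLast_prefix o)
      · exact ih _ _ _

theorem settle_sp_sublist (P : List (Char × Int)) (o : List (Char × Int)) :
    List.Sublist (settle o [] [] P).2.2 P := by
  induction P generalizing o with
  | nil => simp [settle]
  | cons ci rest ih =>
    cases h : o.getLast? with
    | none =>
      simp only [settle, h, List.nil_append]
      rw [settle_acc rest o [] [ci]]
      exact (List.cons_sublist_cons.mpr (ih o)).trans (by simp)
    | some top =>
      simp only [settle, h, List.nil_append]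
      split
      · exact (ih o.dropLast).trans (List.sublist_cons_self ci rest)
      · rw [settle_acc rest o [ci.2] []]
        simpa using (ih o).trans (List.sublist_cons_self ci rest)

-- the dead and still-pending indices together form a sub-multiset of the pending input's indices
theorem settle_ndsp_le (P : List (Char × Int)) (o : List (Char × Int)) :
    (((settle o [] [] P).2.1 : Multiset Int) + ((settle o [] [] P).2.2.map (·.2) : Multiset Int))
      ≤ (P.map (·.2) : Multiset Int) := by
  induction P generalizing o with
  | nil => simp [settle]
  | cons ci rest ih =>
    cases h : o.getLast? with
    | none =>
      simp only [settle, h, List.nil_append]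
      rw [settle_acc rest o [] [ci]]
      simp only [List.map_cons, List.singleton_append,
        ← Multiset.cons_coe]
      rw [Multiset.add_cons]
      exact Multiset.cons_le_cons ci.2 (ih o)
    | some top =>
      simp only [settle, h, List.nil_append]
      split
      · refine (ih o.dropLast).trans ?_
        rw [List.map_cons, ← Multiset.cons_coe]
        exact Multiset.le_cons_self _ _
      · rw [settle_acc rest o [ci.2] []]
        simp only [List.map_cons, List.singleton_append, List.nil_append, ← Multiset.cons_coe]
        rw [Multiset.cons_add]
        exact Multiset.cons_le_cons ci.2 (ih o)
theorem pvPairs_eq_pvP : pvPairs = pvP := rfl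

theorem openClass (c : Char) : ("([{".toList.contains c) = ((pvP.map (·.2)).contains c) := by
  simp only [pvP]
  by_cases h1 : c = '(' <;> by_cases h2 : c = '[' <;> by_cases h3 : c = '{' <;>
    simp_all [List.contains_eq_mem]

theorem main_base (cs : List Char) (lo : Nat) (hlo : lo < cs.length)
    (S : List (Char × Int)) (l : List Int) :
    ((stepA (S, l) ((lo : Int), cs[lo])).1
        = (settle S [] [] (segB cs lo (lo+1)).2.1).1 ++ (segB cs lo (lo+1)).2.2)
    ∧ (((stepA (S, l) ((lo : Int), cs[lo])).2 : Multiset Int)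
        = ↑l + ↑(segB cs lo (lo+1)).1 + ↑(settle S [] [] (segB cs lo (lo+1)).2.1).2.1
          + ↑((settle S [] [] (segB cs lo (lo+1)).2.1).2.2.map (·.2))) := by
  have hget : cs.getD lo ' ' = cs[lo] := List.getD_eq_getElem cs ' ' hlo
  rw [segB, if_pos (by omega : lo + 1 - lo ≤ 1)]
  simp only [hget]
  by_cases hop : "([{".toList.contains cs[lo]
  · have hop' : ((pvP.map (·.2)).contains cs[lo]) = true := (openClass _) ▸ hop
    rw [if_pos hop]
    simp only [stepA, hop', if_true]
    simp [settle]
  · have hop' : ((pvP.map (·.2)).contains cs[lo]) = false := by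
      rw [← openClass]; exact Bool.of_not_eq_true hop
    rw [if_neg hop]
    by_cases hcl : (pvPairs.map (·.1)).contains cs[lo]
    · have hcl' : ((pvP.map (·.1)).contains cs[lo]) = true := pvPairs_eq_pvP ▸ hcl
      rw [if_pos hcl]
      cases hS : S.getLast? with
      | none =>
        simp only [stepA, hop', hcl', hS, Bool.false_eq_true, if_false, if_true]
        simp [settle, hS, ← Multiset.coe_add]
      | some top =>
        by_cases htc : top.1 = (pvPairs.lookup cs[lo]).getD ' '
        · have htc' : top.1 = (List.lookup cs[lo] pvP).getD ' ' := htc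
          simp only [stepA, hop', hcl', hS, Bool.false_eq_true, if_false, if_true]
          simp [settle, hS, htc, pvPairs_eq_pvP]
        · have htc' : ¬ top.1 = (List.lookup cs[lo] pvP).getD ' ' := htc
          simp only [stepA, hop', hcl', hS, Bool.false_eq_true, if_false, if_true]
          simp [settle, hS, htc, htc', ← Multiset.coe_add]
    · have hcl' : ((pvP.map (·.1)).contains cs[lo]) = false := by
        rw [← pvPairs_eq_pvP]; exact Bool.of_not_eq_true hcl
      rw [if_neg hcl]
      simp only [stepA, hop', hcl', Bool.false_eq_true, if_false]
      simp [settle]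
-- the heart of the equivalence: A's machine run over string[lo:hi] is described exactly
-- by B's summary triple for [lo,hi): the surviving stack is S settled by the pending
-- closers plus the segment's surplus openers, and the collected unmatched indices are
-- (as a multiset) the dead, newly-dead and still-pending indices
theorem mainEq (n : Nat) : ∀ (cs : List Char) (lo hi : Nat), hi - lo ≤ n → lo < hi → hi ≤ cs.length →
    ∀ (S : List (Char × Int)) (l : List Int),
    (((PySem.List.enumerate ((cs.drop lo).take (hi - lo)) (lo : Int)).foldl stepA (S, l)).1
        = (settle S [] [] (segB cs lo hi).2.1).1 ++ (segB cs lo hi).2.2)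
  ∧ ((((PySem.List.enumerate ((cs.drop lo).take (hi - lo)) (lo : Int)).foldl stepA (S, l)).2 : Multiset Int)
        = ↑l + ↑(segB cs lo hi).1 + ↑(settle S [] [] (segB cs lo hi).2.1).2.1
           + ↑((settle S [] [] (segB cs lo hi).2.1).2.2.map (·.2))) := by
  induction n with
  | zero => intro cs lo hi h1 h2 h3; omega
  | succ n IH =>
    intro cs lo hi hn hlt hle S l
    by_cases hbase : hi - lo ≤ 1
    · have hhi : hi = lo + 1 := by omega
      subst hhi
      have hlo : lo < cs.length := by omega
      have hdrop : (cs.drop lo).take (lo + 1 - lo) = [cs[lo]] := by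
        rw [List.drop_eq_getElem_cons hlo, Nat.add_sub_cancel_left, List.take_succ_cons,
          List.take_zero]
      rw [hdrop,
        show PySem.List.enumerate [cs[lo]] (lo : Int) = [((lo : Int), cs[lo])] by
          simp [PySem.List.enumerate_cons, PySem.List.enumerate_nil]]
      simp only [List.foldl_cons, List.foldl_nil]
      exact main_base cs lo hlo S l
    · have hmid1 : lo < (lo + hi) / 2 := by omega
      have hmid2 : (lo + hi) / 2 < hi := by omega
      have hsplit : (cs.drop lo).take (hi - lo)
          = (cs.drop lo).take ((lo + hi) / 2 - lo) ++ ((cs.drop ((lo + hi) / 2)).take (hi - (lo + hi) / 2)) := by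
        rw [show hi - lo = ((lo + hi) / 2 - lo) + (hi - (lo + hi) / 2) by omega, List.take_add,
          List.drop_drop, show lo + ((lo + hi) / 2 - lo) = (lo + hi) / 2 by omega]
      have hlen : ((cs.drop lo).take ((lo + hi) / 2 - lo)).length = (lo + hi) / 2 - lo := by
        simp [List.length_take, List.length_drop]
        omega
      have hseg : segB cs lo hi = combineT (segB cs lo ((lo + hi) / 2)) (segB cs ((lo + hi) / 2) hi) := by
        rw [segB, if_neg hbase]
      rw [hsplit, PySem.List.enumerate_append, List.foldl_append, hlen,
        show (lo : Int) + (((lo + hi) / 2 - lo : Nat) : Int) = (((lo + hi) / 2 : Nat) : Int) by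
          push_cast [Nat.cast_sub (by omega : lo ≤ (lo + hi) / 2)]; ring]
      obtain ⟨h1, h2⟩ := IH cs lo ((lo + hi) / 2) (by omega) hmid1 (by omega) S l
      obtain ⟨g1, g2⟩ := IH cs ((lo + hi) / 2) hi (by omega) hmid2 hle
        ((List.foldl stepA (S, l) (PySem.List.enumerate ((cs.drop lo).take ((lo + hi) / 2 - lo)) (lo : Int))).1)
        ((List.foldl stepA (S, l) (PySem.List.enumerate ((cs.drop lo).take ((lo + hi) / 2 - lo)) (lo : Int))).2)
      simp only [Prod.mk.eta] at g1 g2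
      rw [hseg]
      -- abbreviations
      have hsp := settle_split (segB cs ((lo + hi) / 2) hi).2.1
        (settle S [] [] (segB cs lo ((lo + hi) / 2)).2.1).1 (segB cs lo ((lo + hi) / 2)).2.2
      have happ := settle_append (segB cs lo ((lo + hi) / 2)).2.1
        (settle (segB cs lo ((lo + hi) / 2)).2.2 [] [] (segB cs ((lo + hi) / 2) hi).2.1).2.2 S [] []
      have hacc := settle_acc
        (settle (segB cs lo ((lo + hi) / 2)).2.2 [] [] (segB cs ((lo + hi) / 2) hi).2.1).2.2
        (settle S [] [] (segB cs lo ((lo + hi) / 2)).2.1).1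
        (settle S [] [] (segB cs lo ((lo + hi) / 2)).2.1).2.1
        (settle S [] [] (segB cs lo ((lo + hi) / 2)).2.1).2.2
      constructor
      · rw [g1, h1, hsp]
        simp only [combineT, happ, hacc]
        simp [List.append_assoc]
      · rw [g2, h2, h1, hsp]
        simp only [combineT, happ, hacc]
        simp only [mergeInt_coe, List.map_append, ← Multiset.coe_add]
        abel
theorem settle_nd_sublist (P : List (Char × Int)) (o : List (Char × Int)) :
    List.Sublist (settle o [] [] P).2.1 (P.map (·.2)) := by
  induction P generalizing o with
  | nil => simp [settle]
  | cons ci rest ih =>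
    cases h : o.getLast? with
    | none =>
      simp only [settle, h, List.nil_append]
      rw [settle_acc rest o [] [ci]]
      simp only [List.nil_append, List.map_cons]
      exact (ih o).trans (List.sublist_cons_self _ _)
    | some top =>
      simp only [settle, h, List.nil_append]
      split
      · exact (ih o.dropLast).trans (List.sublist_cons_self ci.2 (rest.map (·.2)))
      · rw [settle_acc rest o [ci.2] []]
        simp only [List.singleton_append, List.map_cons]
        exact List.cons_sublist_cons.mpr (ih o)

-- every segment summary has strictly increasing components, indices inside [lo, hi),
-- and no index occurring twice across the three components
theorem segB_inv (n : Nat) : ∀ (cs : List Char) (lo hi : Nat), hi - lo ≤ n → lo < hi → hi ≤ cs.length →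
    ((segB cs lo hi).1.Pairwise (· < ·))
  ∧ (((segB cs lo hi).2.1.map (·.2)).Pairwise (· < ·))
  ∧ (((segB cs lo hi).2.2.map (·.2)).Pairwise (· < ·))
  ∧ (∀ x ∈ (segB cs lo hi).1 ++ (segB cs lo hi).2.1.map (·.2) ++ (segB cs lo hi).2.2.map (·.2),
        (lo : Int) ≤ x ∧ x < (hi : Int))
  ∧ ((segB cs lo hi).1 ++ (segB cs lo hi).2.1.map (·.2) ++ (segB cs lo hi).2.2.map (·.2)).Nodup := by
  induction n with
  | zero => intro cs lo hi h1 h2 h3; omega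
  | succ n IH =>
    intro cs lo hi hn hlt hle
    by_cases hbase : hi - lo ≤ 1
    · have hhi : hi = lo + 1 := by omega
      subst hhi
      rw [segB, if_pos (by omega : lo + 1 - lo ≤ 1)]
      by_cases hc1 : "([{".toList.contains (cs.getD lo ' ') = true
      · simp only [hc1, if_true]
        refine ⟨by simp, by simp, by simp, ?_, by simp⟩
        intro x hx
        simp at hx
        subst hx
        constructor <;> [skip; push_cast] <;> omega
      · by_cases hc2 : (pvPairs.map (·.1)).contains (cs.getD lo ' ') = true
        · simp only [hc1, hc2, if_true, Bool.false_eq_true, if_false]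
          refine ⟨by simp, by simp, by simp, ?_, by simp⟩
          intro x hx
          simp at hx
          subst hx
          constructor <;> [skip; push_cast] <;> omega
        · simp only [hc1, hc2, Bool.false_eq_true, if_false]
          exact ⟨by simp, by simp, by simp, by simp, by simp⟩
    · have hmid1 : lo < (lo + hi) / 2 := by omega
      have hmid2 : (lo + hi) / 2 < hi := by omega
      obtain ⟨dL, pL, oL, bL, nL⟩ := IH cs lo ((lo + hi) / 2) (by omega) hmid1 (by omega)
      obtain ⟨dR, pR, oR, bR, nR⟩ := IH cs ((lo + hi) / 2) hi (by omega) hmid2 hle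
      rw [segB, if_neg hbase]
      simp only [combineT]
      -- facts about the settled left openers against right pendings
      have hpre : ((settle (segB cs lo ((lo + hi) / 2)).2.2 [] [] (segB cs ((lo + hi) / 2) hi).2.1).1.map (·.2)).Sublist
          ((segB cs lo ((lo + hi) / 2)).2.2.map (·.2)) :=
        (settle_o_prefix _ _ _ _).sublist.map _
      have hnd : List.Sublist (settle (segB cs lo ((lo + hi) / 2)).2.2 [] [] (segB cs ((lo + hi) / 2) hi).2.1).2.1
          ((segB cs ((lo + hi) / 2) hi).2.1.map (·.2)) := settle_nd_sublist _ _
      have hsp : ((settle (segB cs lo ((lo + hi) / 2)).2.2 [] [] (segB cs ((lo + hi) / 2) hi).2.1).2.2.map (·.2)).Sublist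
          ((segB cs ((lo + hi) / 2) hi).2.1.map (·.2)) :=
        (settle_sp_sublist _ _).map _
      -- nodup decompositions
      obtain ⟨nL1, nLO, dLO⟩ := List.nodup_append.mp nL
      obtain ⟨nLD, nLP, dLDP⟩ := List.nodup_append.mp nL1
      obtain ⟨nR1, nRO, dRO⟩ := List.nodup_append.mp nR
      obtain ⟨nRD, nRP, dRDP⟩ := List.nodup_append.mp nR1
      -- bound shortcuts
      have bLD : ∀ x ∈ (segB cs lo ((lo + hi) / 2)).1, (lo : Int) ≤ x ∧ x < ((lo + hi) / 2 : Nat) :=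
        fun x hx => bL x (by simp [hx])
      have bLP : ∀ x ∈ (segB cs lo ((lo + hi) / 2)).2.1.map (·.2), (lo : Int) ≤ x ∧ x < ((lo + hi) / 2 : Nat) :=
        fun x hx => bL x (by simp [hx])
      have bLO : ∀ x ∈ (segB cs lo ((lo + hi) / 2)).2.2.map (·.2), (lo : Int) ≤ x ∧ x < ((lo + hi) / 2 : Nat) :=
        fun x hx => bL x (by simp [hx])
      have bRD : ∀ x ∈ (segB cs ((lo + hi) / 2) hi).1, (((lo + hi) / 2 : Nat) : Int) ≤ x ∧ x < (hi : Int) :=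
        fun x hx => bR x (by simp [hx])
      have bRP : ∀ x ∈ (segB cs ((lo + hi) / 2) hi).2.1.map (·.2), (((lo + hi) / 2 : Nat) : Int) ≤ x ∧ x < (hi : Int) :=
        fun x hx => bR x (by simp [hx])
      have bRO : ∀ x ∈ (segB cs ((lo + hi) / 2) hi).2.2.map (·.2), (((lo + hi) / 2 : Nat) : Int) ≤ x ∧ x < (hi : Int) :=
        fun x hx => bR x (by simp [hx])
      have hmergeInner : (mergeInt (segB cs ((lo + hi) / 2) hi).1
          (settle (segB cs lo ((lo + hi) / 2)).2.2 [] [] (segB cs ((lo + hi) / 2) hi).2.1).2.1).Pairwise (· < ·) := by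
        refine mergeInt_pairwise _ _ dR (pR.sublist hnd) ?_
        intro a ha b hb
        exact dRDP a ha b (hnd.subset hb)
      refine ⟨?_, ?_, ?_, ?_, ?_⟩
      · refine mergeInt_pairwise _ _ dL hmergeInner ?_
        intro a ha b hb e
        rcases mergeInt_mem _ _ b hb with hb | hb
        · have := (bLD a ha).2; have := (bRD b hb).1; omega
        · have := (bLD a ha).2; have := (bRP b (hnd.subset hb)).1; omega
      · rw [List.map_append, List.pairwise_append]
        refine ⟨pL, pR.sublist hsp, ?_⟩
        intro a ha b hb
        have := (bLP a ha).2; have := (bRP b (hsp.subset hb)).1; omega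
      · rw [List.map_append, List.pairwise_append]
        refine ⟨oL.sublist hpre, oR, ?_⟩
        intro a ha b hb
        have := (bLO a (hpre.subset ha)).2; have := (bRO b hb).1; omega
      · intro x hx
        have : ((lo : Int) ≤ x ∧ x < (((lo + hi) / 2 : Nat) : Int)) ∨ ((((lo + hi) / 2 : Nat) : Int) ≤ x ∧ x < (hi : Int)) := by
          rcases List.mem_append.mp hx with hx | hxO
          · rcases List.mem_append.mp hx with hxD | hxP
            · rcases mergeInt_mem _ _ x hxD with hx | hx
              · exact Or.inl (bLD x hx)
              · rcases mergeInt_mem _ _ x hx with hx | hx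
                · exact Or.inr (bRD x hx)
                · exact Or.inr (bRP x (hnd.subset hx))
            · rw [List.map_append] at hxP
              rcases List.mem_append.mp hxP with hx | hx
              · exact Or.inl (bLP x hx)
              · exact Or.inr (bRP x (hsp.subset hx))
          · rw [List.map_append] at hxO
            rcases List.mem_append.mp hxO with hx | hx
            · exact Or.inl (bLO x (hpre.subset hx))
            · exact Or.inr (bRO x hx)
        have hm2 : (0:Int) ≤ ((lo + hi) / 2 : Nat) := by positivity
        constructor
        · rcases this with h | h
          · exact h.1
          · refine le_trans ?_ h.1; push_cast; omega
        · rcases this with h | h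
          · refine lt_of_lt_of_le h.2 ?_; push_cast; omega
          · exact h.2
      · have ho2 : (((settle (segB cs lo ((lo + hi) / 2)).2.2 [] [] (segB cs ((lo + hi) / 2) hi).2.1).1.map (·.2) : List Int) : Multiset Int)
            ≤ ↑((segB cs lo ((lo + hi) / 2)).2.2.map (·.2)) := Multiset.coe_le.mpr hpre.subperm
        have hnsp := settle_ndsp_le (segB cs ((lo + hi) / 2) hi).2.1 (segB cs lo ((lo + hi) / 2)).2.2
        have hnodupLR : ((↑(segB cs lo ((lo + hi) / 2)).1 + ↑((segB cs lo ((lo + hi) / 2)).2.1.map (·.2)) + ↑((segB cs lo ((lo + hi) / 2)).2.2.map (·.2))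
            + (↑(segB cs ((lo + hi) / 2) hi).1 + ↑((segB cs ((lo + hi) / 2) hi).2.1.map (·.2)) + ↑((segB cs ((lo + hi) / 2) hi).2.2.map (·.2)))) : Multiset Int).Nodup := by
          rw [Multiset.nodup_add]
          refine ⟨?_, ?_, ?_⟩
          · simpa only [Multiset.coe_add, Multiset.coe_nodup] using nL
          · simpa only [Multiset.coe_add, Multiset.coe_nodup] using nR
          · rw [Multiset.disjoint_left]
            intro a haL haR
            simp only [Multiset.coe_add, Multiset.mem_coe] at haL haR
            have h1 := (bL a haL).2
            have h2 := (bR a haR).1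
            omega
        rw [← Multiset.coe_nodup]
        simp only [List.map_append, ← Multiset.coe_add, mergeInt_coe]
        refine Multiset.nodup_of_le ?_ hnodupLR
        trans ((↑(segB cs lo ((lo + hi) / 2)).1 + ↑((segB cs lo ((lo + hi) / 2)).2.1.map (·.2))
              + ↑((settle (segB cs lo ((lo + hi) / 2)).2.2 [] [] (segB cs ((lo + hi) / 2) hi).2.1).1.map (·.2)))
            + (↑(segB cs ((lo + hi) / 2) hi).1
              + (↑(settle (segB cs lo ((lo + hi) / 2)).2.2 [] [] (segB cs ((lo + hi) / 2) hi).2.1).2.1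
                + ↑((settle (segB cs lo ((lo + hi) / 2)).2.2 [] [] (segB cs ((lo + hi) / 2) hi).2.1).2.2.map (·.2)))
              + ↑((segB cs ((lo + hi) / 2) hi).2.2.map (·.2))) : Multiset Int)
        · exact le_of_eq (by abel)
        · exact add_le_add (add_le_add le_rfl ho2) (add_le_add (add_le_add le_rfl hnsp) le_rfl)
-- ===== VERDICT (by name: the statement is the Claim_ definition above) =====
theorem find_unmatched_brackets_spec : Claim_equal_find_unmatched_brackets := by
  intro s _
  simp only [Spec_find_unmatched_brackets, find_unmatched_brackets, find_unmatched_brackets_alt]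
  by_cases h : s.toList = []
  · rw [h, if_pos rfl]
    simp only [PySem.List.enumerate_nil, List.foldl_nil, List.map_nil, List.append_nil]
    apply PySem.List.sorted_eq_of_perm_of_pairwise_lt <;> simp
  · rw [if_neg h]
    have hpos : 0 < s.toList.length := List.length_pos_iff.mpr h
    obtain ⟨h1, h2⟩ := mainEq s.toList.length s.toList 0 s.toList.length (by omega) hpos
      (le_refl _) [] []
    obtain ⟨dP, pP, oP, bP, nP⟩ := segB_inv s.toList.length s.toList 0 s.toList.length
      (by omega) hpos (le_refl _)
    simp only [Nat.sub_zero, List.drop_zero, List.take_length, Nat.cast_zero, settle_nil_o,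
      List.nil_append, Multiset.coe_nil, zero_add] at h1 h2
    obtain ⟨nP1, nPO, dPO⟩ := List.nodup_append.mp nP
    obtain ⟨nPD, nPP, dPDP⟩ := List.nodup_append.mp nP1
    apply PySem.List.sorted_eq_of_perm_of_pairwise_lt
    · rw [← Multiset.coe_eq_coe]
      simp only [← Multiset.coe_add, mergeInt_coe]
      rw [h2, congrArg (List.map (·.2)) h1]
      abel
    · refine mergeInt_pairwise _ _ (mergeInt_pairwise _ _ dP pP ?_) oP ?_
      · intro a ha b hb
        exact dPDP a ha b hb
      · intro a ha b hb
        rcases mergeInt_mem _ _ a ha with ha | ha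
        · exact dPO a (List.mem_append.mpr (Or.inl ha)) b hb
        · exact dPO a (List.mem_append.mpr (Or.inr ha)) b hb
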